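-- pv_equiv track=rewrite | github.com/KyraSebestyen/bioEmbedding | mapBertToTokensServer.py | get_sentence_token_mapping
-- ===== SOURCE A (Python) =====
-- def get_sentence_token_mapping(doc):
--   sentence_token_mapping = {}
--
--   current_sentence = 0
--   token_id_in_sent = 0
--   for i, t in enumerate(doc):
--     if t["sentence_id"] != current_sentence:
--       current_sentence = t["sentence_id"]
--       token_id_in_sent = 0
--     sentence_token_mapping[(current_sentence, token_id_in_sent)] = i
--     token_id_in_sent += 1
--
--   return sentence_token_mapping
-- ===== SOURCE B (Python) =====
-- def get_sentence_token_mapping(doc):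
--     # Staged: (1) extract sentence ids, (2) compute run-start boundary
--     # positions by pairwise comparison, (3) fill each [start, end) interval
--     # arithmetically -- no current_sentence/counter state machine.
--     sids = [t["sentence_id"] for t in doc]
--     n = len(sids)
--     bounds = [i for i in range(n) if i == 0 or sids[i] != sids[i - 1]]
--     mapping = {}
--     for s, e in zip(bounds, bounds[1:] + [n]):
--         sid = sids[s]
--         for j in range(e - s):
--             mapping[(sid, j)] = s + j
--     return mapping
-- ===== Notes on version B (the rewrite author's own statement) =====
-- stated objective: alternative
-- what changed: Replaces A's single-pass current_sentence/token_id_in_sent reset state machine with three stages: extract the sentence-id list, compute the run-boundary index list by pairwise comparison, then fill each boundary interval arithmetically (local index = position - run start).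
import Mathlib
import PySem

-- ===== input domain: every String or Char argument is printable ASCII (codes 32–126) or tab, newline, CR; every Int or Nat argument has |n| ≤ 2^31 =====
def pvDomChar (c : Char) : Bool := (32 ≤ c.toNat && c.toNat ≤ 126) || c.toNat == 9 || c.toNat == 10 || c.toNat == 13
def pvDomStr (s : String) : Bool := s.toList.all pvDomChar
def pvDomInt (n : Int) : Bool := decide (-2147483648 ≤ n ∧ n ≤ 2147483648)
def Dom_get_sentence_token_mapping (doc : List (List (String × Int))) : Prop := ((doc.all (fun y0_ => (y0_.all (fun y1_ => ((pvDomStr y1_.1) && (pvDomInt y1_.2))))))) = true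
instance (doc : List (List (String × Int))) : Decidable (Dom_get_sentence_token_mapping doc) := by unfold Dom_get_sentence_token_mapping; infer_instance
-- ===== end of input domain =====

-- B replaces A's current_sentence/token_id_in_sent reset state machine with three stages:
-- extract the sentence-id list, compute run-boundary positions by pairwise comparison,
-- then fill each boundary interval arithmetically (local index = position - run start).

-- ===== PORT A =====
-- t["sentence_id"]: exact on Pre_ (key present); on a missing key Python raises KeyError,
-- which Pre_ excludes, so the .getD 0 default is never observed there.
def pvSid (t : List (String × Int)) : Int :=
  (PySem.Dict.get? (PySem.Dict.mk t) "sentence_id").getD 0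

-- the for-loop of A as structural recursion over the same state (dict, current_sentence, token_id_in_sent, i)
def aGo (rest : List (List (String × Int))) (d : PySem.Dict (Int × Int) Int)
    (cur tok i : Int) : PySem.Dict (Int × Int) Int :=
  match rest with
  | [] => d
  | t :: ts =>
    let sid := pvSid t
    let st := if sid ≠ cur then (sid, (0 : Int)) else (cur, tok)
    aGo ts (d.insert (st.1, st.2) i) st.1 (st.2 + 1) (i + 1)

def get_sentence_token_mapping (doc : List (List (String × Int))) : List (Int × Int × Int) :=
  (aGo doc PySem.Dict.empty 0 0 0).items.map (fun p => (p.1.1, p.1.2, p.2))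

-- ===== PORT B =====
-- stage 1: sids = [t["sentence_id"] for t in doc] (same KeyError domain as A, excluded by Pre_)
def bSids (doc : List (List (String × Int))) : List Int :=
  doc.map (fun t => (PySem.Dict.get? (PySem.Dict.mk t) "sentence_id").getD 0)

-- stage 2: bounds = [i for i in range(n) if i == 0 or sids[i] != sids[i-1]]
-- (for i ≥ 1 both indices are in range, so getD is exact; at i = 0 the disjunction is already true)
def bBounds (sids : List Int) : List Nat :=
  (List.range sids.length).filter (fun i => i == 0 || !(sids.getD i 0 == sids.getD (i - 1) 0))

-- stage 3 inner loop: for j in range(e - s): mapping[(sid, j)] = s + j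
def bFillRun (d : PySem.Dict (Int × Int) Int) (sid : Int) (s e : Nat) : PySem.Dict (Int × Int) Int :=
  (List.range (e - s)).foldl (fun d (j : Nat) => d.insert (sid, (j : Int)) (Int.ofNat (s + j))) d

def get_sentence_token_mapping_alt (doc : List (List (String × Int))) : List (Int × Int × Int) :=
  let sids := bSids doc
  let bounds := bBounds sids
  ((bounds.zip (bounds.drop 1 ++ [sids.length])).foldl
      (fun d se => bFillRun d (sids.getD se.1 0) se.1 se.2) PySem.Dict.empty).items.map
    (fun p => (p.1.1, p.1.2, p.2))

-- ===== PRECONDITION & SPEC =====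
-- Pre_ excludes exactly the inputs on which Python A raises KeyError: a token without a "sentence_id" key.
def Pre_get_sentence_token_mapping (doc : List (List (String × Int))) : Prop :=
  ∀ t ∈ doc, "sentence_id" ∈ t.map Prod.fst

instance (doc : List (List (String × Int))) : Decidable (Pre_get_sentence_token_mapping doc) := by
  unfold Pre_get_sentence_token_mapping; infer_instance

def pvWitness_get_sentence_token_mapping : (List (List (String × Int))) :=
  [[("sentence_id", 0)], [("sentence_id", 0)], [("sentence_id", 1)]]

def Spec_get_sentence_token_mapping (doc : List (List (String × Int))) (out : List (Int × Int × Int)) : Prop := out = get_sentence_token_mapping_alt doc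
instance (doc : List (List (String × Int))) (out : List (Int × Int × Int)) : Decidable (Spec_get_sentence_token_mapping doc out) := by unfold Spec_get_sentence_token_mapping; infer_instance

-- ===== CLAIM (what is proved, stated in full; the proofs are below) =====
def Claim_equal_get_sentence_token_mapping : Prop := ∀ (doc : List (List (String × Int))), Dom_get_sentence_token_mapping doc → Pre_get_sentence_token_mapping doc → Spec_get_sentence_token_mapping doc (get_sentence_token_mapping doc)

-- ===== LEMMAS AND PROOFS =====

-- B's dict-building fold with an explicit global offset added to the stored indices
-- (proof generalization of the stage-3 loop; Efold sids d 0 is B's dict).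
def Efold (sids : List Int) (d : PySem.Dict (Int × Int) Int) (off : Nat) : PySem.Dict (Int × Int) Int :=
  ((bBounds sids).zip ((bBounds sids).drop 1 ++ [sids.length])).foldl
    (fun d se => (List.range (se.2 - se.1)).foldl
        (fun d (j : Nat) => d.insert (sids.getD se.1 0, (j : Int)) (Int.ofNat (off + se.1 + j))) d) d

theorem filter_range_succ (n : Nat) (p : Nat → Bool) :
    (List.range (n + 1)).filter p =
      (if p 0 then [0] else []) ++ ((List.range n).filter (fun i => p (i + 1))).map (· + 1) := by
  rw [List.range_succ_eq_map, List.filter_cons, List.filter_map]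
  split <;> rfl

theorem foldl_range_succ_left {α : Type} (f : α → Nat → α) (d : α) (n : Nat) :
    (List.range (n + 1)).foldl f d = (List.range n).foldl (fun d j => f d (j + 1)) (f d 0) := by
  rw [List.range_succ_eq_map, List.foldl_cons, List.foldl_map]

theorem bBounds_nil : bBounds [] = [] := rfl

-- run-peel characterization of the boundary list
theorem bBounds_cons (a : Int) (rest : List Int) :
    bBounds (a :: rest) =
      0 :: ((bBounds (rest.dropWhile (· == a))).map (· + (rest.takeWhile (· == a)).length + 1)) := by
  induction rest generalizing a with
  | nil => simp [bBounds]
  | cons b rest' ih =>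
    have key : ∀ (c : Int), bBounds (c :: b :: rest') =
        0 :: ((if b == c then ([] : List Nat) else [0]) ++
          ((List.range rest'.length).filter
            (fun i => !(rest'.getD i 0 == (b :: rest').getD i 0))).map (· + 1)).map (· + 1) := by
      intro c
      show (List.range (rest'.length + 1 + 1)).filter _ = _
      rw [filter_range_succ]
      simp only [List.getD_cons_succ, List.getD_cons_zero]
      rw [filter_range_succ]
      simp only [List.getD_cons_succ, List.getD_cons_zero]
      simp
    have aux : bBounds (b :: rest') =
        0 :: ((List.range rest'.length).filter
            (fun i => !(rest'.getD i 0 == (b :: rest').getD i 0))).map (· + 1) := by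
      show (List.range (rest'.length + 1)).filter _ = _
      rw [filter_range_succ]
      simp only [List.getD_cons_succ, List.getD_cons_zero]
      simp
    by_cases hba : b = a
    · subst hba
      have hL := (ih b).symm.trans aux
      have hL' := (List.cons.injEq _ _ _ _).mp hL |>.2
      rw [key b]
      simp only [beq_self_eq_true, if_true, List.nil_append]
      rw [← hL']
      simp only [List.takeWhile_cons, List.dropWhile_cons, beq_self_eq_true, if_true,
        List.map_map]
      apply congrArg
      apply List.map_congr_left
      intro x _
      simp only [Function.comp_apply, List.length_cons]
      omega
    · have hba' : (b == a) = false := beq_eq_false_iff_ne.mpr hba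
      rw [key a]
      simp only [hba', List.takeWhile_cons, List.dropWhile_cons, Bool.false_eq_true, if_false]
      rw [aux]
      simp [List.map_map]

-- A's loop over a run of tokens all carrying sentence_id a is a range-indexed fold of inserts
theorem aGo_run (a : Int) (rest₁ : List (List (String × Int))) (h : ∀ t ∈ rest₁, pvSid t = a) :
    ∀ (rest₂ : List (List (String × Int))) (d : PySem.Dict (Int × Int) Int) (k i : Int),
      aGo (rest₁ ++ rest₂) d a k i =
        aGo rest₂ ((List.range rest₁.length).foldl
            (fun d (j : Nat) => d.insert (a, k + (j : Int)) (i + (j : Int))) d)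
          a (k + rest₁.length) (i + rest₁.length) := by
  induction rest₁ with
  | nil => intro rest₂ d k i; simp
  | cons t ts ih =>
    intro rest₂ d k i
    have ht : pvSid t = a := h t (by simp)
    have hts : ∀ u ∈ ts, pvSid u = a := fun u hu => h u (by simp [hu])
    simp only [List.cons_append, aGo, ht, ne_eq, not_true_eq_false, if_false]
    rw [ih hts]
    have e3 : (List.range ts.length).foldl
        (fun d (j : Nat) => PySem.Dict.insert d (a, (k + 1) + (j : Int)) ((i + 1) + (j : Int)))
        (d.insert (a, k) i) =
        (List.range (t :: ts).length).foldl
          (fun d (j : Nat) => PySem.Dict.insert d (a, k + (j : Int)) (i + (j : Int))) d := by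
      rw [List.length_cons, foldl_range_succ_left]
      congr 1
      · funext d j; push_cast; ring_nf
      · simp
    rw [e3]
    congr 1 <;> push_cast [List.length_cons] <;> ring

-- peeling the first run off B's staged interval fill
theorem Efold_cons (a : Int) (rest : List Int) (d : PySem.Dict (Int × Int) Int) (off : Nat) :
    Efold (a :: rest) d off =
      Efold (rest.dropWhile (· == a))
        ((List.range ((rest.takeWhile (· == a)).length + 1)).foldl
          (fun d (j : Nat) => d.insert (a, (j : Int)) (Int.ofNat (off + j))) d)
        (off + ((rest.takeWhile (· == a)).length + 1)) := by
  have hlen : rest.length = (rest.takeWhile (· == a)).length + (rest.dropWhile (· == a)).length := by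
    have h := congrArg List.length (List.takeWhile_append_dropWhile (p := (· == a)) (l := rest))
    rw [List.length_append] at h
    omega
  have hsplit : a :: rest = (a :: rest.takeWhile (· == a)) ++ rest.dropWhile (· == a) := by
    simp [List.takeWhile_append_dropWhile]
  have hgetD : ∀ s : Nat,
      (a :: rest).getD (s + (rest.takeWhile (· == a)).length + 1) 0 =
        (rest.dropWhile (· == a)).getD s 0 := by
    intro s
    rw [hsplit, List.getD_append_right _ _ _ _ (by simp [Nat.add_comm])]
    congr 1
    simp
  cases hdwe : rest.dropWhile (· == a) with
  | nil =>
    rw [hdwe] at hlen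
    have hn : (a :: rest).length = (rest.takeWhile (· == a)).length + 1 := by
      simp [hlen]
    unfold Efold
    rw [bBounds_cons, hdwe, bBounds_nil]
    simp only [List.map_nil, List.drop_succ_cons, List.drop_nil, List.nil_append,
      List.zip_cons_cons, List.zip_nil_right, List.zip_nil_left, List.foldl_cons, List.foldl_nil]
    rw [hn]
    simp
  | cons c dw' =>
    rw [hdwe] at hlen hgetD
    obtain ⟨T, hT⟩ : ∃ T, bBounds (c :: dw') = 0 :: T := ⟨_, bBounds_cons c dw'⟩
    have hn : (a :: rest).length =
        ((rest.takeWhile (· == a)).length + 1) + (c :: dw').length := by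
      simp only [List.length_cons]
      simp only [List.length_cons] at hlen
      omega
    unfold Efold
    rw [bBounds_cons, hdwe, hT]
    simp only [List.drop_succ_cons, List.drop_zero]
    rw [show ((0 : Nat) :: T).map (· + (rest.takeWhile (· == a)).length + 1) =
        (0 + (rest.takeWhile (· == a)).length + 1) ::
          T.map (· + (rest.takeWhile (· == a)).length + 1) from by simp]
    rw [List.cons_append, List.zip_cons_cons, List.foldl_cons]
    have hfirst : ∀ (d₀ : PySem.Dict (Int × Int) Int),
        (List.range (0 + (rest.takeWhile (· == a)).length + 1 - 0)).foldl
          (fun d (j : Nat) =>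
            d.insert ((a :: rest).getD 0 0, (j : Int)) (Int.ofNat (off + 0 + j))) d₀ =
        (List.range ((rest.takeWhile (· == a)).length + 1)).foldl
          (fun d (j : Nat) => d.insert (a, (j : Int)) (Int.ofNat (off + j))) d₀ := by
      intro d₀
      simp
    rw [hfirst]
    rw [show ((0 + (rest.takeWhile (· == a)).length + 1) ::
        T.map (· + (rest.takeWhile (· == a)).length + 1)) =
        ((0 : Nat) :: T).map (· + (rest.takeWhile (· == a)).length + 1) from by simp]
    rw [hn]
    have h2 : T.map (· + (rest.takeWhile (· == a)).length + 1) ++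
        [(rest.takeWhile (· == a)).length + 1 + (c :: dw').length] =
        (T ++ [(c :: dw').length]).map (· + (rest.takeWhile (· == a)).length + 1) := by
      simp
      omega
    rw [h2, List.zip_map, List.foldl_map]
    congr 1
    funext d₀ se
    simp only [Prod.map_fst, Prod.map_snd]
    have hsub : se.2 + (rest.takeWhile (· == a)).length + 1 -
        (se.1 + (rest.takeWhile (· == a)).length + 1) = se.2 - se.1 := by omega
    rw [hsub, hgetD]
    congr 1
    funext d₁ j
    congr 2
    omega

-- main correspondence: A's state machine equals B's offset interval fill
theorem aGo_eq_Efold (N : Nat) : ∀ (doc : List (List (String × Int))), doc.length ≤ N →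
    ∀ (d : PySem.Dict (Int × Int) Int) (cur tok : Int) (off : Nat),
      (∀ t, doc.head? = some t → pvSid t = cur → tok = 0) →
      aGo doc d cur tok (off : Int) = Efold (bSids doc) d off := by
  induction N with
  | zero =>
    intro doc h d cur tok off _
    have : doc = [] := List.eq_nil_of_length_eq_zero (Nat.le_zero.mp h)
    subst this
    simp [aGo, bSids, Efold, bBounds_nil]
  | succ N ih =>
    intro doc h d cur tok off hcond
    match doc with
    | [] => simp [aGo, bSids, Efold, bBounds_nil]
    | t :: rest =>
      have hrest : rest.length ≤ N := by
        have : (t :: rest).length ≤ N + 1 := h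
        simpa using this
      -- first element: either no reset (then tok = 0 by hcond) or reset; both land in state (pvSid t, 1)
      have hstep : aGo (t :: rest) d cur tok ((off : Nat) : Int) =
          aGo rest (d.insert (pvSid t, 0) ((off : Nat) : Int)) (pvSid t) 1 (((off : Nat) : Int) + 1) := by
        by_cases hc : pvSid t = cur
        · have ht0 : tok = 0 := hcond t rfl hc
          simp [aGo, hc, ht0]
        · simp [aGo, hc]
      rw [hstep]
      have hall : ∀ u ∈ rest.takeWhile (fun u => pvSid u == pvSid t), pvSid u = pvSid t := by
        intro u hu
        simpa using List.mem_takeWhile_imp hu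
      conv_lhs => rw [← List.takeWhile_append_dropWhile
        (p := fun u => pvSid u == pvSid t) (l := rest)]
      rw [aGo_run _ _ hall]
      -- B side: peel the first run
      rw [show bSids (t :: rest) = pvSid t :: bSids rest from rfl, Efold_cons]
      have htk : (bSids rest).takeWhile (· == pvSid t) =
          bSids (rest.takeWhile (fun u => pvSid u == pvSid t)) := by
        unfold bSids
        rw [List.takeWhile_map]
        rfl
      have hdk : (bSids rest).dropWhile (· == pvSid t) =
          bSids (rest.dropWhile (fun u => pvSid u == pvSid t)) := by
        unfold bSids
        rw [List.dropWhile_map]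
        rfl
      rw [htk, hdk]
      have hlen1 : (bSids (rest.takeWhile (fun u => pvSid u == pvSid t))).length =
          (rest.takeWhile (fun u => pvSid u == pvSid t)).length := by
        unfold bSids; rw [List.length_map]
      rw [hlen1]
      -- the two first-run dicts coincide
      have hD : (List.range ((rest.takeWhile (fun u => pvSid u == pvSid t)).length + 1)).foldl
          (fun d (j : Nat) => PySem.Dict.insert d (pvSid t, (j : Int)) (Int.ofNat (off + j))) d =
          (List.range (rest.takeWhile (fun u => pvSid u == pvSid t)).length).foldl
            (fun d (j : Nat) =>
              PySem.Dict.insert d (pvSid t, 1 + (j : Int)) ((((off : Nat) : Int) + 1) + (j : Int)))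
            (d.insert (pvSid t, 0) ((off : Nat) : Int)) := by
        rw [foldl_range_succ_left]
        congr 1
        · funext d j
          push_cast [Int.ofNat_eq_natCast]
          ring_nf
      rw [hD]
      -- IH on the remaining runs
      have hlen2 : (rest.dropWhile (fun u => pvSid u == pvSid t)).length ≤ N :=
        le_trans (List.Sublist.length_le (List.dropWhile_sublist _)) hrest
      have hhead : ∀ u, (rest.dropWhile (fun u => pvSid u == pvSid t)).head? = some u →
          pvSid u = pvSid t → (1 + ((rest.takeWhile (fun u => pvSid u == pvSid t)).length : Int)) = 0 := by
        intro u hu hs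
        have := List.head?_dropWhile_not (fun u => pvSid u == pvSid t) rest
        rw [hu] at this
        simp [hs] at this
      have hcast : (((off : Nat) : Int) + 1) + ((rest.takeWhile (fun u => pvSid u == pvSid t)).length : Int) =
          (((off + ((rest.takeWhile (fun u => pvSid u == pvSid t)).length + 1) : Nat)) : Int) := by
        push_cast
        ring
      rw [hcast]
      exact ih _ hlen2 _ _ _ _ hhead

-- ===== VERDICT (by name: the statement is the Claim_ definition above) =====
theorem get_sentence_token_mapping_spec : Claim_equal_get_sentence_token_mapping := by
  intro doc _ _
  unfold Spec_get_sentence_token_mapping get_sentence_token_mapping get_sentence_token_mapping_alt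
  have hB : ((bBounds (bSids doc)).zip ((bBounds (bSids doc)).drop 1 ++ [(bSids doc).length])).foldl
      (fun d se => bFillRun d ((bSids doc).getD se.1 0) se.1 se.2) PySem.Dict.empty =
      Efold (bSids doc) PySem.Dict.empty 0 := by
    unfold Efold bFillRun
    congr 1
    funext d se
    congr 1
    funext d j
    simp
  have hA : aGo doc PySem.Dict.empty 0 0 0 = Efold (bSids doc) PySem.Dict.empty 0 := by
    simpa using aGo_eq_Efold doc.length doc le_rfl PySem.Dict.empty 0 0 0 (fun t _ _ => rfl)
  show (aGo doc PySem.Dict.empty 0 0 0).items.map _ = _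
  rw [hA, ← hB]
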